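-- pv_equiv track=rewrite | github.com/njr0/abouttag | abouttag/books.py | move_article
-- ===== SOURCE A (Python) =====
-- LC_ARTICLES = (u'the', u'a')
--
-- def move_article(title):
--     """Moves trailing article after comma to the start of a title.
--        So
--
--           Catcher in the Rye, The --> The Catcher in the Rye
--           Catcher in the Rye,The  --> The Catcher in the Rye
--           The Catcher in the Rye  --> The Catcher in the Rye
--           Catcher in the Rye      --> Catcher in the Rye
--           A Stitch in Time        --> A Stitch in Time
--           Stitch in Time, A       --> A Stitch in Time
--           Stitch in Time,A        --> A Stitch in Time
--           Stitch in Time          --> Stitch in Time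
--
--        Currently only handles 'a' and 'the', but it just uses
--        a word list, so it would be easy to add le/la etc.
--
--        Case is unaffected.
--
--     """
--     L = title.lower()
--     if not title:
--         return u''
--     for a in LC_ARTICLES:
--         if L.endswith(u', ' + a):
--             return u'%s %s' % (title[-len(a):], title[:-(len(a) + 2)])
--         elif L.endswith(u',' + a):
--             return u'%s %s' % (title[-len(a):], title[:-(len(a) + 1)])
--     return title
-- ===== SOURCE B (Python) =====
-- ARTICLE_TAILS = {'the', 'a', ' the', ' a'}
--
-- def move_article(title):
--     head, sep, tail = title.rpartition(',')
--     if sep and tail.lower() in ARTICLE_TAILS: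
--         return tail.lstrip(' ') + ' ' + head
--     return title
-- ===== Notes on version B (the rewrite author's own statement) =====
-- stated objective: simpler
-- what changed: B splits the title once at the last comma (rpartition) and classifies the tail by membership in a small article-tail set, instead of A's loop of per-article endswith tests with hand-computed suffix patterns and negative-slice arithmetic.
import Mathlib
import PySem

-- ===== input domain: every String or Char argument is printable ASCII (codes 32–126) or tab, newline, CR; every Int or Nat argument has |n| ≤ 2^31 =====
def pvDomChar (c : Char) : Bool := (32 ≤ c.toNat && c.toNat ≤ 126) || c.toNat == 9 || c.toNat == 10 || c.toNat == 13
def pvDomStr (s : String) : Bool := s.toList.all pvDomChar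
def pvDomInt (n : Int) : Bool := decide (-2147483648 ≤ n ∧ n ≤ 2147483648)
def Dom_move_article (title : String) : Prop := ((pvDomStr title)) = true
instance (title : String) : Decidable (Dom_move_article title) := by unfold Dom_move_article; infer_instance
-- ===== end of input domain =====

-- B re-implements move_article by rpartition-at-the-last-comma plus a membership test on the
-- tail, replacing A's per-article endswith checks and slice arithmetic (objective: simpler).

-- ===== PORT A =====
-- the 'for a in LC_ARTICLES' loop with its early returns: Option result, none = loop fell through
def moveArticleLoop (title L : List Char) : List (List Char) → Option (List Char)
  | [] => none
  | a :: rest =>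
    if PySem.Chars.endswith L (',' :: ' ' :: a) then
      some (PySem.List.slice title (some (-(a.length : Int))) none ++
            ' ' :: PySem.List.slice title none (some (-((a.length : Int) + 2))))
    else if PySem.Chars.endswith L (',' :: a) then
      some (PySem.List.slice title (some (-(a.length : Int))) none ++
            ' ' :: PySem.List.slice title none (some (-((a.length : Int) + 1))))
    else moveArticleLoop title L rest

def move_article (title : String) : String :=
  if title.toList = [] then ""
  else
    match moveArticleLoop title.toList (PySem.Chars.lower title.toList)
        ["the".toList, "a".toList] with
    | some r => String.ofList r
    | none => title

-- ===== PORT B =====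
-- hand port of str.rpartition(title, ','): split at the LAST ',' as (head, sep, tail);
-- exact: sep = [] (and head = []) exactly when there is no comma, as in Python
def rpartitionComma (cs : List Char) : List Char × List Char × List Char :=
  match cs.reverse.dropWhile (fun c => c != ',') with
  | [] => ([], [], cs)
  | _ :: rh => (rh.reverse, [','], (cs.reverse.takeWhile (fun c => c != ',')).reverse)

def move_article_alt (title : String) : String :=
  match rpartitionComma title.toList with
  | (head, sep, tail) =>
    if sep ≠ [] ∧ PySem.Chars.lower tail ∈ ["the".toList, "a".toList, " the".toList, " a".toList]
    then String.ofList (tail.dropWhile (fun c => c == ' ') ++ ' ' :: head)  -- tail.lstrip(' ') + ' ' + head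
    else title

-- ===== PRECONDITION & SPEC =====
def Spec_move_article (title : String) (out : String) : Prop := out = move_article_alt title
instance (title : String) (out : String) : Decidable (Spec_move_article title out) := by unfold Spec_move_article; infer_instance

-- ===== CLAIM (what is proved, stated in full; the proofs are below) =====
def Claim_equal_move_article : Prop := ∀ (title : String), Dom_move_article title → Spec_move_article title (move_article title)

-- ===== LEMMAS AND PROOFS =====

theorem slice_neg_from (cs : List Char) (k : Nat) (h : 0 < k) (hk : k ≤ cs.length) :
    PySem.List.slice cs (some (-(k : Int))) none = cs.drop (cs.length - k) := by
  simp only [PySem.List.slice, PySem.List.clampIdx]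
  split_ifs with h1 h2
  · omega
  · have ha : ((cs.length : Int) + -(k : Int)).toNat = cs.length - k := by omega
    rw [ha]
    exact List.take_of_length_le (by simp)
  · omega

theorem slice_neg_to (cs : List Char) (k : Nat) (h : 0 < k) (hk : k ≤ cs.length) :
    PySem.List.slice cs none (some (-(k : Int))) = cs.take (cs.length - k) := by
  simp only [PySem.List.slice, PySem.List.clampIdx]
  split_ifs with h1 h2
  · omega
  · simp only [List.drop_zero]
    congr 1; omega
  · omega

theorem upper_bounds (c : Char) (h : PySem.Chars.isupper c = true) :
    65 ≤ c.toNat ∧ c.toNat ≤ 90 := by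
  simp only [PySem.Chars.isupper, Bool.and_eq_true, decide_eq_true_eq, Char.le_def] at h
  exact h

theorem toNat_upper (c : Char) (h : PySem.Chars.isupper c = true) :
    (Char.ofNat (c.toNat + 32)).toNat = c.toNat + 32 := by
  obtain ⟨h1, h2⟩ := upper_bounds c h
  rw [Char.toNat_ofNat, if_pos]
  left; omega

theorem lowerChar_eq_comma (c : Char) : PySem.Chars.lowerChar c = ',' ↔ c = ',' := by
  simp only [PySem.Chars.lowerChar]
  split_ifs with h
  · obtain ⟨h1, h2⟩ := upper_bounds c h
    constructor
    · intro he
      have ht := congrArg Char.toNat he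
      rw [toNat_upper c h] at ht
      have h44 : (','.toNat) = 44 := rfl
      exfalso; omega
    · intro he; subst he; exfalso
      have : (','.toNat) = 44 := rfl
      omega
  · exact Iff.rfl

theorem lowerChar_eq_space (c : Char) (h : PySem.Chars.lowerChar c = ' ') : c = ' ' := by
  revert h
  simp only [PySem.Chars.lowerChar]
  split_ifs with h
  · obtain ⟨h1, h2⟩ := upper_bounds c h
    intro he
    have ht := congrArg Char.toNat he
    rw [toNat_upper c h] at ht
    have h32 : (' '.toNat) = 32 := rfl
    exfalso; omega
  · exact id

theorem bne_lowerChar_comma (c : Char) : (PySem.Chars.lowerChar c != ',') = (c != ',') := by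
  by_cases h : c = ','
  · subst h; rfl
  · have hne : PySem.Chars.lowerChar c ≠ ',' := fun he => h ((lowerChar_eq_comma c).mp he)
    simp [bne, hne, h]

theorem prefix_snoc_iff (a : Char) (v r : List Char) (hv : a ∉ v) :
    v ++ [a] <+: r ↔ (r.takeWhile (fun x => x != a) = v ∧ r.dropWhile (fun x => x != a) ≠ []) := by
  induction r generalizing v with
  | nil => simp
  | cons x r' ih =>
    by_cases hx : x = a
    · subst hx
      simp only [List.takeWhile_cons, List.dropWhile_cons, bne_self_eq_false, Bool.false_eq_true,
        ite_false]
      cases v with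
      | nil => simp [List.prefix_cons_iff]
      | cons y v' =>
        constructor
        · intro h
          rw [List.cons_append, List.cons_prefix_cons] at h
          simp at hv; exact (hv.1 h.1.symm).elim
        · rintro ⟨h, -⟩; exact absurd h (by simp)
    · have hbne : (x != a) = true := by simpa using hx
      simp only [List.takeWhile_cons, List.dropWhile_cons, hbne, ite_true]
      cases v with
      | nil =>
        constructor
        · intro h
          rw [List.nil_append, List.cons_prefix_cons] at h
          exact absurd h.1 (Ne.symm hx)
        · rintro ⟨h, -⟩; exact absurd h (by simp)
      | cons y v' =>
        rw [List.cons_append, List.cons_prefix_cons,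
          ih v' (by simp at hv; exact fun h => hv.2 h)]
        constructor
        · rintro ⟨rfl, h1, h2⟩; exact ⟨by rw [h1], h2⟩
        · rintro ⟨h, h2⟩
          injection h with h3 h4
          exact ⟨h3.symm, h4, h2⟩

theorem cond_iff (cs w : List Char) (hw : ',' ∉ w) :
    PySem.Chars.endswith (PySem.Chars.lower cs) (',' :: w) = true ↔
      ((cs.reverse.takeWhile (fun x => x != ',')).map PySem.Chars.lowerChar = w.reverse ∧
        cs.reverse.dropWhile (fun x => x != ',') ≠ []) := by
  rw [PySem.Chars.endswith_iff, ← List.reverse_prefix]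
  simp only [List.reverse_cons]
  rw [PySem.Chars.lower, List.map_reverse.symm]
  rw [prefix_snoc_iff ',' w.reverse (List.map PySem.Chars.lowerChar cs.reverse) (by simpa using hw)]
  rw [List.takeWhile_map, List.dropWhile_map]
  have hp : ∀ x, ((fun x => x != ',') ∘ PySem.Chars.lowerChar) x = (fun x => x != ',') x :=
    fun x => bne_lowerChar_comma x
  rw [funext hp]
  simp

theorem dropWhile_cons_head_false (p : Char → Bool) (l : List Char) (x : Char) (r : List Char)
    (h : l.dropWhile p = x :: r) : p x = false := by
  induction l with
  | nil => simp at h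
  | cons y l ih =>
    rw [List.dropWhile_cons] at h
    by_cases hy : p y = true
    · rw [if_pos hy] at h; exact ih h
    · rw [if_neg hy] at h; cases h; simpa using hy

theorem takeWhile_all_append (p : Char → Bool) (l1 l2 : List Char) (x : Char)
    (h1 : ∀ y ∈ l1, p y = true) (hx : p x = false) :
    (l1 ++ x :: l2).takeWhile p = l1 ∧ (l1 ++ x :: l2).dropWhile p = x :: l2 := by
  induction l1 with
  | nil => simp [hx]
  | cons y l1' ih =>
    have hy : p y = true := h1 y (by simp)
    have := ih (fun z hz => h1 z (by simp [hz]))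
    simp [List.takeWhile_cons, hy, this.1, this.2]


-- the heart of the equivalence: a title whose last comma splits it as H ++ ',' ++ T
theorem move_article_core (H T : List Char) (hT : ',' ∉ T) (title : String)
    (hsplit : title.toList = H ++ ',' :: T) :
    move_article title = move_article_alt title := by
  have hR : title.toList.reverse = T.reverse ++ ',' :: H.reverse := by
    rw [hsplit]; simp
  have htwdw := takeWhile_all_append (fun c => c != ',') T.reverse H.reverse ','
    (by intro y hy; simp at hy ⊢; intro he; exact hT (he ▸ hy)) (by decide)
  have tw : title.toList.reverse.takeWhile (fun c => c != ',') = T.reverse := by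
    rw [hR]; exact htwdw.1
  have dw : title.toList.reverse.dropWhile (fun c => c != ',') = ',' :: H.reverse := by
    rw [hR]; exact htwdw.2
  have hne : title.toList ≠ [] := by rw [hsplit]; simp
  have hcond : ∀ w : List Char, ',' ∉ w →
      (PySem.Chars.endswith (PySem.Chars.lower title.toList) (',' :: w) = true ↔
        PySem.Chars.lower T = w) := by
    intro w hw
    rw [cond_iff _ _ hw, tw, dw]
    have hm : T.reverse.map PySem.Chars.lowerChar = (PySem.Chars.lower T).reverse := by
      simp [PySem.Chars.lower]
    rw [hm, List.reverse_inj]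
    simp
  have hB : move_article_alt title =
      (if PySem.Chars.lower T ∈ ["the".toList, "a".toList, " the".toList, " a".toList]
       then String.ofList (T.dropWhile (fun c => c == ' ') ++ ' ' :: H) else title) := by
    simp only [move_article_alt, rpartitionComma, dw, tw]
    simp
  by_cases m1 : PySem.Chars.lower T = " the".toList
  · -- trailing ', The'
    have c1 : PySem.Chars.endswith (PySem.Chars.lower title.toList)
        (',' :: ' ' :: "the".toList) = true :=
      (hcond (' ' :: "the".toList) (by decide)).mpr (by rw [m1]; decide)
    have hTlen : T.length = 4 := by
      have := congrArg List.length m1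
      simpa [PySem.Chars.lower] using this
    have hlen : title.toList.length = H.length + 5 := by
      simp [hsplit, hTlen]
    have hs1 : PySem.List.slice title.toList (some (-("the".toList.length : Int))) none
        = T.drop 1 := by
      rw [slice_neg_from title.toList "the".toList.length (by decide)
        (le_trans (by decide : "the".toList.length ≤ 5) (by rw [hlen]; omega))]
      have h3 : "the".toList.length = 3 := by decide
      rw [h3, hlen]
      have h2 : H.length + 5 - 3 = H.length + 2 := by omega
      rw [h2, hsplit, List.drop_length_add_append]
      simp
    have hs2 : PySem.List.slice title.toList none (some (-(("the".toList.length : Int) + 2)))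
        = H := by
      have h5 : -(("the".toList.length : Int) + 2) = -((5:Nat) : Int) := by decide
      rw [h5, slice_neg_to title.toList 5 (by omega) (by rw [hlen]; omega)]
      rw [hlen]
      have h2 : H.length + 5 - 5 = H.length := by omega
      rw [h2, hsplit, List.take_left]
    have hdw : T.dropWhile (fun c => c == ' ') = T.drop 1 := by
      rcases T with _ | ⟨a, _ | ⟨b, T2⟩⟩
      · simp [PySem.Chars.lower] at m1
      · simp [PySem.Chars.lower] at m1
      · have hm : PySem.Chars.lowerChar a = ' ' ∧ PySem.Chars.lowerChar b = 't' := by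
          have := m1
          simp [PySem.Chars.lower] at this
          exact ⟨this.1, this.2.1⟩
        have ha : a = ' ' := lowerChar_eq_space a hm.1
        have hb : (b == ' ') = false := by
          rcases eq_or_ne b ' ' with rfl | hb'
          · exact absurd hm.2 (by decide)
          · simpa using hb'
        subst ha
        simp [List.dropWhile_cons, hb]
    rw [hB, if_pos (by rw [m1]; decide)]
    simp only [move_article, moveArticleLoop, hne, ite_false, c1, ite_true, hs1, hs2, hdw]
  · by_cases m2 : PySem.Chars.lower T = "the".toList
    · -- trailing ',The'
      have c1f : PySem.Chars.endswith (PySem.Chars.lower title.toList)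
          (',' :: ' ' :: "the".toList) = false := by
        rw [Bool.eq_false_iff]
        intro hc
        exact absurd (m2.symm.trans ((hcond (' ' :: "the".toList) (by decide)).mp hc)) (by decide)
      have c2 : PySem.Chars.endswith (PySem.Chars.lower title.toList)
          (',' :: "the".toList) = true :=
        (hcond ("the".toList) (by decide)).mpr m2
      have hTlen : T.length = 3 := by
        have := congrArg List.length m2
        simpa [PySem.Chars.lower] using this
      have hlen : title.toList.length = H.length + 4 := by
        simp [hsplit, hTlen]
      have hs1 : PySem.List.slice title.toList (some (-("the".toList.length : Int))) none
          = T := by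
        rw [slice_neg_from title.toList "the".toList.length (by decide)
          (le_trans (by decide : "the".toList.length ≤ 4) (by rw [hlen]; omega))]
        have h3 : "the".toList.length = 3 := by decide
        rw [h3, hlen]
        have h2 : H.length + 4 - 3 = H.length + 1 := by omega
        rw [h2, hsplit, List.drop_length_add_append]
        simp
      have hs2 : PySem.List.slice title.toList none (some (-(("the".toList.length : Int) + 1)))
          = H := by
        have h5 : -(("the".toList.length : Int) + 1) = -((4:Nat) : Int) := by decide
        rw [h5, slice_neg_to title.toList 4 (by omega) (by rw [hlen]; omega)]
        rw [hlen]
        have h2 : H.length + 4 - 4 = H.length := by omega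
        rw [h2, hsplit, List.take_left]
      have hdw : T.dropWhile (fun c => c == ' ') = T := by
        rcases T with _ | ⟨a, T1⟩
        · simp [PySem.Chars.lower] at m2
        · have hm : PySem.Chars.lowerChar a = 't' := by
            have := m2
            simp [PySem.Chars.lower] at this
            exact this.1
          have ha : (a == ' ') = false := by
            rcases eq_or_ne a ' ' with rfl | ha'
            · exact absurd hm (by decide)
            · simpa using ha'
          simp [ha]
      rw [hB, if_pos (by rw [m2]; decide)]
      simp only [move_article, moveArticleLoop, hne, ite_false, c1f, c2, ite_true,
        Bool.false_eq_true, hs1, hs2, hdw]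
    · by_cases m3 : PySem.Chars.lower T = " a".toList
      · -- trailing ', A'
        have c1f : PySem.Chars.endswith (PySem.Chars.lower title.toList)
            (',' :: ' ' :: "the".toList) = false := by
          rw [Bool.eq_false_iff]
          intro hc
          exact absurd (m3.symm.trans ((hcond (' ' :: "the".toList) (by decide)).mp hc)) (by decide)
        have c2f : PySem.Chars.endswith (PySem.Chars.lower title.toList)
            (',' :: "the".toList) = false := by
          rw [Bool.eq_false_iff]
          intro hc
          exact absurd (m3.symm.trans ((hcond ("the".toList) (by decide)).mp hc)) (by decide)
        have c3 : PySem.Chars.endswith (PySem.Chars.lower title.toList)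
            (',' :: ' ' :: "a".toList) = true :=
          (hcond (' ' :: "a".toList) (by decide)).mpr (by rw [m3]; decide)
        have hTlen : T.length = 2 := by
          have := congrArg List.length m3
          simpa [PySem.Chars.lower] using this
        have hlen : title.toList.length = H.length + 3 := by
          simp [hsplit, hTlen]
        have hs1 : PySem.List.slice title.toList (some (-("a".toList.length : Int))) none
            = T.drop 1 := by
          rw [slice_neg_from title.toList "a".toList.length (by decide)
            (le_trans (by decide : "a".toList.length ≤ 3) (by rw [hlen]; omega))]
          have h3 : "a".toList.length = 1 := by decide
          rw [h3, hlen]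
          have h2 : H.length + 3 - 1 = H.length + 2 := by omega
          rw [h2, hsplit, List.drop_length_add_append]
          simp
        have hs2 : PySem.List.slice title.toList none (some (-(("a".toList.length : Int) + 2)))
            = H := by
          have h5 : -(("a".toList.length : Int) + 2) = -((3:Nat) : Int) := by decide
          rw [h5, slice_neg_to title.toList 3 (by omega) (by rw [hlen]; omega)]
          rw [hlen]
          have h2 : H.length + 3 - 3 = H.length := by omega
          rw [h2, hsplit, List.take_left]
        have hdw : T.dropWhile (fun c => c == ' ') = T.drop 1 := by
          rcases T with _ | ⟨a, _ | ⟨b, T2⟩⟩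
          · simp [PySem.Chars.lower] at m3
          · simp [PySem.Chars.lower] at m3
          · have hm : PySem.Chars.lowerChar a = ' ' ∧ PySem.Chars.lowerChar b = 'a' := by
              have := m3
              simp [PySem.Chars.lower] at this
              exact ⟨this.1, this.2.1⟩
            have ha : a = ' ' := lowerChar_eq_space a hm.1
            have hb : (b == ' ') = false := by
              rcases eq_or_ne b ' ' with rfl | hb'
              · exact absurd hm.2 (by decide)
              · simpa using hb'
            subst ha
            simp [hb]
        rw [hB, if_pos (by rw [m3]; decide)]
        simp only [move_article, moveArticleLoop, hne, ite_false, c1f, c2f, c3, ite_true,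
          Bool.false_eq_true, hs1, hs2, hdw]
      · by_cases m4 : PySem.Chars.lower T = "a".toList
        · -- trailing ',A'
          have c1f : PySem.Chars.endswith (PySem.Chars.lower title.toList)
              (',' :: ' ' :: "the".toList) = false := by
            rw [Bool.eq_false_iff]
            intro hc
            exact absurd (m4.symm.trans ((hcond (' ' :: "the".toList) (by decide)).mp hc)) (by decide)
          have c2f : PySem.Chars.endswith (PySem.Chars.lower title.toList)
              (',' :: "the".toList) = false := by
            rw [Bool.eq_false_iff]
            intro hc
            exact absurd (m4.symm.trans ((hcond ("the".toList) (by decide)).mp hc)) (by decide)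
          have c3f : PySem.Chars.endswith (PySem.Chars.lower title.toList)
              (',' :: ' ' :: "a".toList) = false := by
            rw [Bool.eq_false_iff]
            intro hc
            exact absurd (m4.symm.trans ((hcond (' ' :: "a".toList) (by decide)).mp hc)) (by decide)
          have c4 : PySem.Chars.endswith (PySem.Chars.lower title.toList)
              (',' :: "a".toList) = true :=
            (hcond ("a".toList) (by decide)).mpr m4
          have hTlen : T.length = 1 := by
            have := congrArg List.length m4
            simpa [PySem.Chars.lower] using this
          have hlen : title.toList.length = H.length + 2 := by
            simp [hsplit, hTlen]
          have hs1 : PySem.List.slice title.toList (some (-("a".toList.length : Int))) none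
              = T := by
            rw [slice_neg_from title.toList "a".toList.length (by decide)
              (le_trans (by decide : "a".toList.length ≤ 2) (by rw [hlen]; omega))]
            have h3 : "a".toList.length = 1 := by decide
            rw [h3, hlen]
            have h2 : H.length + 2 - 1 = H.length + 1 := by omega
            rw [h2, hsplit, List.drop_length_add_append]
            simp
          have hs2 : PySem.List.slice title.toList none (some (-(("a".toList.length : Int) + 1)))
              = H := by
            have h5 : -(("a".toList.length : Int) + 1) = -((2:Nat) : Int) := by decide
            rw [h5, slice_neg_to title.toList 2 (by omega) (by rw [hlen]; omega)]
            rw [hlen]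
            have h2 : H.length + 2 - 2 = H.length := by omega
            rw [h2, hsplit, List.take_left]
          have hdw : T.dropWhile (fun c => c == ' ') = T := by
            rcases T with _ | ⟨a, T1⟩
            · simp [PySem.Chars.lower] at m4
            · have hm : PySem.Chars.lowerChar a = 'a' := by
                have := m4
                simp [PySem.Chars.lower] at this
                exact this.1
              have ha : (a == ' ') = false := by
                rcases eq_or_ne a ' ' with rfl | ha'
                · exact absurd hm (by decide)
                · simpa using ha'
              simp [ha]
          rw [hB, if_pos (by rw [m4]; decide)]
          simp only [move_article, moveArticleLoop, hne, ite_false, c1f, c2f, c3f, c4, ite_true,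
            Bool.false_eq_true, hs1, hs2, hdw]
        · -- no article after the last comma: both sides return the title unchanged
          have c1f : PySem.Chars.endswith (PySem.Chars.lower title.toList)
              (',' :: ' ' :: "the".toList) = false := by
            rw [Bool.eq_false_iff]
            intro hc
            exact m1 ((hcond (' ' :: "the".toList) (by decide)).mp hc)
          have c2f : PySem.Chars.endswith (PySem.Chars.lower title.toList)
              (',' :: "the".toList) = false := by
            rw [Bool.eq_false_iff]
            intro hc
            exact m2 ((hcond ("the".toList) (by decide)).mp hc)
          have c3f : PySem.Chars.endswith (PySem.Chars.lower title.toList)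
              (',' :: ' ' :: "a".toList) = false := by
            rw [Bool.eq_false_iff]
            intro hc
            exact m3 ((hcond (' ' :: "a".toList) (by decide)).mp hc)
          have c4f : PySem.Chars.endswith (PySem.Chars.lower title.toList)
              (',' :: "a".toList) = false := by
            rw [Bool.eq_false_iff]
            intro hc
            exact m4 ((hcond ("a".toList) (by decide)).mp hc)
          have m1' : ¬ PySem.Chars.lower T = [' ', 't', 'h', 'e'] := by simpa using m1
          have m2' : ¬ PySem.Chars.lower T = ['t', 'h', 'e'] := by simpa using m2
          have m3' : ¬ PySem.Chars.lower T = [' ', 'a'] := by simpa using m3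
          have m4' : ¬ PySem.Chars.lower T = ['a'] := by simpa using m4
          rw [hB, if_neg (by simp [m1', m2', m3', m4'])]
          simp only [move_article, moveArticleLoop, hne, ite_false, c1f, c2f, c3f, c4f,
            Bool.false_eq_true]

-- ===== VERDICT (by name: the statement is the Claim_ definition above) =====
theorem move_article_spec : Claim_equal_move_article := by
  intro title _
  unfold Spec_move_article
  cases hq : title.toList.reverse.dropWhile (fun c => c != ',') with
  | nil =>
    -- no comma in the title: every endswith test fails, rpartition finds no separator
    have hcondf : ∀ w : List Char, ',' ∉ w →
        PySem.Chars.endswith (PySem.Chars.lower title.toList) (',' :: w) = false := by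
      intro w hw
      rw [Bool.eq_false_iff]
      intro hc
      exact ((cond_iff title.toList w hw).mp hc).2 hq
    have c1f := hcondf (' ' :: "the".toList) (by decide)
    have c2f := hcondf ("the".toList) (by decide)
    have c3f := hcondf (' ' :: "a".toList) (by decide)
    have c4f := hcondf ("a".toList) (by decide)
    by_cases he : title.toList = []
    · have ht : title = "" := String.toList_eq_nil_iff.mp he
      rw [ht]; decide
    · simp only [move_article, moveArticleLoop, he, ite_false, c1f, c2f, c3f, c4f,
        Bool.false_eq_true, move_article_alt, rpartitionComma, hq]
      simp
  | cons x q' =>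
    have hx : x = ',' := by
      have hh := dropWhile_cons_head_false (fun c => c != ',') title.toList.reverse x q' hq
      simpa using hh
    subst hx
    have hpre := List.takeWhile_append_dropWhile
      (p := fun c => c != ',') (l := title.toList.reverse)
    rw [hq] at hpre
    have hsplit : title.toList =
        q'.reverse ++ ',' :: (title.toList.reverse.takeWhile (fun c => c != ',')).reverse := by
      calc title.toList = title.toList.reverse.reverse := (List.reverse_reverse _).symm
        _ = ((title.toList.reverse.takeWhile (fun c => c != ',')) ++ ',' :: q').reverse := by
              rw [hpre]
        _ = q'.reverse ++ ',' :: (title.toList.reverse.takeWhile (fun c => c != ',')).reverse := by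
              simp
    have hT : ',' ∉ (title.toList.reverse.takeWhile (fun c => c != ',')).reverse := by
      intro hc
      rw [List.mem_reverse] at hc
      have := List.mem_takeWhile_imp hc
      simp at this
    exact move_article_core _ _ hT title hsplit
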